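-- pv_equiv track=rewrite | github.com/RakshithLincode/STAMPING_WORKER | common_utils.py | convert_list_order
-- ===== SOURCE A (Python) =====
-- def convert_list_order(value):
-- 	count = 0
-- 	barcode_dict = {} # Barcode Dict Values
-- 	list_value = []
-- 	list_check = ['Net_Wt', 'Bag_ID', 'Description', 'Material_ID', 'Batch_ID']
-- 	for i in value:
-- 		if len(i) == 8:
-- 			barcode_dict['Bag_ID'] = i
-- 			list_value.append('Bag_ID')
-- 		if len(i) == 7:
-- 			barcode_dict['Material_ID'] = i
-- 			list_value.append('Material_ID')
-- 		if i == '5.0':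
-- 			barcode_dict['Net_Wt'] = i
-- 			list_value.append('Net_Wt')
-- 		if i == '10.0':
-- 			barcode_dict['Net_Wt'] = i
-- 			list_value.append('Net_Wt')
-- 		if len(i) == 10 and i[0] == '0':
-- 			barcode_dict['Batch_ID'] = i
-- 			list_value.append('Batch_ID')
-- 		if len(i) == 6:
-- 			barcode_dict['Description'] = i
-- 			list_value.append('Description')
-- 	for item in list_check:
-- 		if item not in list_value:
-- 			barcode_dict[item] = 'None'
-- 		else:
-- 			pass
-- 	return barcode_dict
-- ===== SOURCE B (Python) =====
-- LABELS = ['Net_Wt', 'Bag_ID', 'Description', 'Material_ID', 'Batch_ID']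
--
-- def _label_of(i):
--     # the five tests are mutually exclusive (lengths 8, 7, 3/4, 10, 6), so each
--     # element carries at most one label
--     if len(i) == 8:
--         return 'Bag_ID'
--     if len(i) == 7:
--         return 'Material_ID'
--     if i in ('5.0', '10.0'):
--         return 'Net_Wt'
--     if len(i) == 10 and i[0] == '0':
--         return 'Batch_ID'
--     if len(i) == 6:
--         return 'Description'
--     return None
--
-- def convert_list_order(value):
--     hits = [(l, i) for i in value for l in (_label_of(i),) if l is not None]
--     order = list(dict.fromkeys(l for l, _ in hits))
--     order = order + [l for l in LABELS if l not in order]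
--     def last(l):
--         for lab, i in reversed(hits):
--             if lab == l:
--                 return i
--         return 'None'
--     return {l: last(l) for l in order}
-- ===== Notes on version B (the rewrite author's own statement) =====
-- stated objective: alternative
-- what changed: B is key-major instead of element-major: it tags each element once with its (mutually exclusive) label, derives the key order as first occurrences of those labels plus the missing labels, and resolves each key's value by a reverse search for the last matching element - no mutable dict building and no fill-missing second pass over a dict.
import Mathlib
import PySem

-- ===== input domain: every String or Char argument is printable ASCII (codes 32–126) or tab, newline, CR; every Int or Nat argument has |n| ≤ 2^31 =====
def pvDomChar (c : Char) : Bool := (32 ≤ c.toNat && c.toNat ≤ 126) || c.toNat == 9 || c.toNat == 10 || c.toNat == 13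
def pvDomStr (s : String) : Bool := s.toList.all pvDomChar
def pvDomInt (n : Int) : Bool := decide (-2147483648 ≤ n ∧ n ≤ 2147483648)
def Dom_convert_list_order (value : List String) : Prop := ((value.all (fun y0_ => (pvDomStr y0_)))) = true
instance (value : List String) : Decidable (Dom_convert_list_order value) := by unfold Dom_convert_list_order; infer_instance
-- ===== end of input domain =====

-- B is key-major: it tags each element with its label once, derives the key order
-- (first occurrences + missing labels) and fills each key by a reverse last-match search
-- instead of A's mutable-dict build plus fill-missing pass (objective: alternative).

-- ===== PORT A =====
-- one loop iteration of A: the six ifs updating (barcode_dict, list_value);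
-- 'i[0] == "0"' is evaluated only under the 'len(i) == 10' guard (short-circuit 'and'),
-- where it is exactly a first-character comparison (Python's length-1 str ↔ Char).
def pvStepA (st : PySem.Dict String String × List String) (i : String) :
    PySem.Dict String String × List String :=
  let st := if PySem.Str.len i = 8 then (st.1.insert "Bag_ID" i, st.2 ++ ["Bag_ID"]) else st
  let st := if PySem.Str.len i = 7 then (st.1.insert "Material_ID" i, st.2 ++ ["Material_ID"]) else st
  let st := if i = "5.0" then (st.1.insert "Net_Wt" i, st.2 ++ ["Net_Wt"]) else st
  let st := if i = "10.0" then (st.1.insert "Net_Wt" i, st.2 ++ ["Net_Wt"]) else st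
  let st := if PySem.Str.len i = 10 ∧ PySem.Str.pyGet? i 0 = some '0' then
              (st.1.insert "Batch_ID" i, st.2 ++ ["Batch_ID"]) else st
  if PySem.Str.len i = 6 then (st.1.insert "Description" i, st.2 ++ ["Description"]) else st

def convert_list_order (value : List String) : List (String × String) :=
  let list_check := ["Net_Wt", "Bag_ID", "Description", "Material_ID", "Batch_ID"]
  let st := value.foldl pvStepA (PySem.Dict.empty, [])
  let d := list_check.foldl
    (fun d item => if item ∈ st.2 then d else d.insert item "None") st.1
  d.items

-- ===== PORT B =====
-- _label_of of Source B (early-return chain → nested ifs); the five tests are mutually exclusive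
def pvLabelOf (i : String) : Option String :=
  if PySem.Str.len i = 8 then some "Bag_ID"
  else if PySem.Str.len i = 7 then some "Material_ID"
  else if i = "5.0" ∨ i = "10.0" then some "Net_Wt"
  else if PySem.Str.len i = 10 ∧ PySem.Str.pyGet? i 0 = some '0' then some "Batch_ID"
  else if PySem.Str.len i = 6 then some "Description"
  else none

def pvLabels : List String := ["Net_Wt", "Bag_ID", "Description", "Material_ID", "Batch_ID"]

-- Source B's 'last': scan hits reversed for the first pair labelled l, default 'None'
def pvLast (hits : List (String × String)) (l : String) : String :=
  match hits.reverse.find? (fun p => p.1 == l) with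
  | some p => p.2
  | none => "None"

-- Source B: hits comprehension; order = dict.fromkeys + missing labels; final dict
-- comprehension over the (distinct, insertion-ordered) keys of 'order' — its items
-- are exactly this map since 'order' has no duplicates.
def convert_list_order_alt (value : List String) : List (String × String) :=
  let hits := value.filterMap (fun i => (pvLabelOf i).map (fun l => (l, i)))
  let order := PySem.List.dedup (hits.map Prod.fst)
  let order := order ++ pvLabels.filter (fun l => !(order.contains l))
  order.map (fun l => (l, pvLast hits l))

-- ===== PRECONDITION & SPEC =====
def Spec_convert_list_order (value : List String) (out : List (String × String)) : Prop := out = convert_list_order_alt value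
instance (value : List String) (out : List (String × String)) : Decidable (Spec_convert_list_order value out) := by unfold Spec_convert_list_order; infer_instance

-- ===== CLAIM (what is proved, stated in full; the proofs are below) =====
def Claim_equal_convert_list_order : Prop := ∀ (value : List String), Dom_convert_list_order value → Spec_convert_list_order value (convert_list_order value)

-- ===== LEMMAS AND PROOFS =====

-- proof-side abbreviations for B's intermediate lists
def pvHits (value : List String) : List (String × String) :=
  value.filterMap (fun i => (pvLabelOf i).map (fun l => (l, i)))

def pvIns (d : PySem.Dict String String) (p : String × String) : PySem.Dict String String :=
  d.insert p.1 p.2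

-- A's six ifs are a dispatch on the (mutually exclusive) label of i
lemma pvStepA_collapse (d : PySem.Dict String String) (lv : List String) (i : String) :
    pvStepA (d, lv) i =
      match pvLabelOf i with
      | some l => (d.insert l i, lv ++ [l])
      | none => (d, lv) := by
  unfold pvStepA pvLabelOf
  split_ifs <;> simp_all [PySem.Str.len]

-- A's first loop = fold of inserts over the hits, recording the labels
lemma pvLoop_collapse (value : List String) (d : PySem.Dict String String) (lv : List String) :
    value.foldl pvStepA (d, lv) =
      ((pvHits value).foldl pvIns d, lv ++ (pvHits value).map Prod.fst) := by
  induction value generalizing d lv with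
  | nil => simp [pvHits]
  | cons x xs ih =>
      simp only [List.foldl_cons, pvStepA_collapse]
      cases h : pvLabelOf x with
      | none => simp [pvHits, h, ih]
      | some l => simp [pvHits, h, ih, pvIns]

-- lookup in the built dict = last matching hit, else the initial lookup
lemma pvGetD_foldl (hits : List (String × String)) (d : PySem.Dict String String) (l : String) :
    (hits.foldl pvIns d).getD l "None" =
      match hits.reverse.find? (fun p => p.1 == l) with
      | some p => p.2
      | none => d.getD l "None" := by
  induction hits generalizing d with
  | nil => rfl
  | cons p rest ih =>
      simp only [List.foldl_cons, List.reverse_cons, List.find?_append, ih]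
      cases hf : rest.reverse.find? (fun p => p.1 == l) with
      | some q => simp
      | none =>
          by_cases he : p.1 = l
          · subst he; simp [pvIns, PySem.Dict.getD_insert_self]
          · have hb : (p.1 == l) = false := by simp [he]
            simp [hb, pvIns, PySem.Dict.getD_insert, Ne.symm he]

lemma pvKeys_foldl (hits : List (String × String)) :
    (hits.foldl pvIns PySem.Dict.empty).keys = PySem.List.dedup (hits.map Prod.fst) := by
  have h := PySem.Dict.keys_foldl_insert_key hits Prod.fst (fun _ p => p.2) PySem.Dict.empty
  simpa [pvIns, PySem.Dict.keys_empty, PySem.Set.update_nil_left, PySem.List.dedup_eq_ofList] using h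

-- A's second loop: keys gain exactly the labels missing from lv (value "None",
-- which is also the default, so every getD _ "None" is unchanged)
lemma pvFill (labels : List String) (d : PySem.Dict String String) (lv : List String)
    (hnd : labels.Nodup) (h : ∀ l ∈ labels, l ∉ lv → d.contains l = false) :
    (labels.foldl (fun d item => if item ∈ lv then d else d.insert item "None") d).keys
        = d.keys ++ labels.filter (fun l => !(decide (l ∈ lv)))
    ∧ ∀ l, (labels.foldl (fun d item => if item ∈ lv then d else d.insert item "None") d).getD l "None"
        = d.getD l "None" := by
  induction labels generalizing d with
  | nil => simp
  | cons x xs ih =>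
      simp only [List.foldl_cons]
      by_cases hx : x ∈ lv
      · have := ih d hnd.of_cons (fun l hl hnl => h l (by simp [hl]) hnl)
        simpa [hx] using this
      · have hcx : d.contains x = false := h x (by simp) hx
        have hrec := ih (d.insert x "None") hnd.of_cons ?_
        · constructor
          · rw [if_neg hx, hrec.1, PySem.Dict.keys_insert_of_not_contains _ _ hcx]
            simp [hx]
          · intro l
            rw [if_neg hx, hrec.2 l, PySem.Dict.getD_insert]
            split
            · next he => rw [he, PySem.Dict.getD_of_not_contains _ _ hcx]
            · rfl
        · intro l hl hnl
          rw [PySem.Dict.contains_insert]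
          have hne : l ≠ x := fun he => (List.nodup_cons.mp hnd).1 (he ▸ hl)
          simp [hne]
          exact h l (by simp [hl]) hnl

-- both programs, after the loop collapses, compute the same items list
lemma pvMain (hits : List (String × String)) :
    (["Net_Wt", "Bag_ID", "Description", "Material_ID", "Batch_ID"].foldl
        (fun d item => if item ∈ hits.map Prod.fst then d else d.insert item "None")
        (hits.foldl pvIns PySem.Dict.empty)).items
      = (PySem.List.dedup (hits.map Prod.fst)
          ++ pvLabels.filter (fun l => !((PySem.List.dedup (hits.map Prod.fst)).contains l))).map
          (fun l => (l, pvLast hits l)) := by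
  have hkeys1 : (hits.foldl pvIns PySem.Dict.empty).keys = PySem.List.dedup (hits.map Prod.fst) :=
    pvKeys_foldl hits
  have hfill := pvFill ["Net_Wt", "Bag_ID", "Description", "Material_ID", "Batch_ID"]
    (hits.foldl pvIns PySem.Dict.empty) (hits.map Prod.fst) (by decide) ?_
  · have hnd2 : (["Net_Wt", "Bag_ID", "Description", "Material_ID", "Batch_ID"].foldl
        (fun d item => if item ∈ hits.map Prod.fst then d else d.insert item "None")
        (hits.foldl pvIns PySem.Dict.empty)).keys.Nodup := by
      rw [hfill.1, hkeys1]
      refine List.Nodup.append (PySem.List.nodup_dedup _) (List.Nodup.filter _ (by decide)) ?_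
      intro l hl hr
      have hl' : l ∈ hits.map Prod.fst := by
        simpa [PySem.List.mem_dedup] using hl
      have hmem := List.of_mem_filter hr
      rw [Bool.not_eq_true', decide_eq_false_iff_not] at hmem
      exact hmem hl'
    rw [PySem.Dict.items_eq_map_keys _ hnd2 "None", hfill.1, hkeys1]
    have horder :
        List.filter (fun l => !(decide (l ∈ hits.map Prod.fst)))
            ["Net_Wt", "Bag_ID", "Description", "Material_ID", "Batch_ID"]
        = pvLabels.filter (fun l => !((PySem.List.dedup (hits.map Prod.fst)).contains l)) := by
      apply List.filter_congr
      intro l _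
      simp
    rw [horder]
    apply List.map_congr_left
    intro l _
    rw [hfill.2 l, pvGetD_foldl hits PySem.Dict.empty l]
    unfold pvLast
    cases hits.reverse.find? (fun p => p.1 == l) <;> simp [PySem.Dict.getD_empty]
  · intro l _ hnl
    rw [PySem.Dict.contains_eq_decide_mem_keys, hkeys1]
    simp only [PySem.List.mem_dedup, decide_eq_false_iff_not]
    exact hnl

-- ===== VERDICT (by name: the statement is the Claim_ definition above) =====
theorem convert_list_order_spec : Claim_equal_convert_list_order := by
  intro value _
  unfold Spec_convert_list_order convert_list_order convert_list_order_alt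
  dsimp only
  rw [pvLoop_collapse value PySem.Dict.empty []]
  simp only [List.nil_append]
  exact pvMain (pvHits value)
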